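-- pv_equiv track=rewrite | github.com/kykrueger/openbis | sanofi/dist/etc/sanofi-dropbox/utilfunctions.py | removeTrailingEmptyElements
-- ===== SOURCE A (Python) =====
-- def removeTrailingEmptyElements(list):
--     pos = len(list)
--     while (pos > 0):
--         pos = pos - 1
--         if not list[pos].strip():
--             del list[pos]
--         else:
--             break
--     return list
-- ===== SOURCE B (Python) =====
-- def removeTrailingEmptyElements(list):
--     keep = 0
--     for i, s in enumerate(list):
--         if s.strip():
--             keep = i + 1
--     del list[keep:]
--     return list
-- ===== Notes on version B (the rewrite author's own statement) =====
-- stated objective: alternative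
-- what changed: B makes a single forward pass with enumerate, tracking the index after the last non-whitespace element in an accumulator, and then truncates once; A scans backwards from the end deleting empty elements one per iteration until it hits a non-empty one.
import Mathlib
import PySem

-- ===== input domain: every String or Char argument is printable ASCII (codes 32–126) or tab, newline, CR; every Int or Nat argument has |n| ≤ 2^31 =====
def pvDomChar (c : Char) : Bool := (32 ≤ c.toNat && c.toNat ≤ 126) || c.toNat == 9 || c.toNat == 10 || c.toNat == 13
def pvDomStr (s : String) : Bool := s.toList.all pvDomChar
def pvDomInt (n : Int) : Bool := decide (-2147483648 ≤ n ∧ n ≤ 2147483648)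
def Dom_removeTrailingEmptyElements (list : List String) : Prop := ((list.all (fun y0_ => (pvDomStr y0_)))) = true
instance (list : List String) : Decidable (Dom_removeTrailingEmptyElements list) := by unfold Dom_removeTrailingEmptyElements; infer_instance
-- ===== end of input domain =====

-- B replaces A's backward delete-as-you-scan loop by a single forward pass that tracks
-- the index after the last non-whitespace element, then truncates once.
-- A mutates its argument in place in Python; the equivalence proved here is about the
-- returned value.


-- ===== PORT A =====
-- A's while loop: pos starts at len(list); each iteration decrements pos, and either
-- deletes list[pos] (the current last element, i.e. truncates to `take pos`) and loops,
-- or breaks. `l.getD pos ""` is list[pos]; pos is always in range here.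
def pvLoopA : List String → Nat → List String
  | l, 0 => l
  | l, pos + 1 =>
      if (PySem.Str.strip (l.getD pos "")).isEmpty then pvLoopA (l.take pos) pos else l

def removeTrailingEmptyElements (list : List String) : List String :=
  pvLoopA list list.length

-- ===== PORT B =====
-- B's forward pass: fold over enumerate(list) keeping `keep` = index after the last
-- non-whitespace element; then `del list[keep:]` leaves list[:keep].
def removeTrailingEmptyElements_alt (list : List String) : List String :=
  let keep := (PySem.List.enumerate list).foldl
    (fun keep p => if ¬ (PySem.Str.strip p.2).isEmpty then p.1 + 1 else keep) (0 : Int)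
  PySem.List.slice list none (some keep)

-- ===== PRECONDITION & SPEC =====
def Spec_removeTrailingEmptyElements (list : List String) (out : List String) : Prop := out = removeTrailingEmptyElements_alt list
instance (list : List String) (out : List String) : Decidable (Spec_removeTrailingEmptyElements list out) := by unfold Spec_removeTrailingEmptyElements; infer_instance

-- ===== CLAIM =====
def Claim_equal_removeTrailingEmptyElements : Prop := ∀ (list : List String), Dom_removeTrailingEmptyElements list → Spec_removeTrailingEmptyElements list (removeTrailingEmptyElements list)

-- ===== LEMMAS AND PROOFS =====

-- proof helper: the cutoff index of the backward characterization
def pvCut (l : List String) : Nat → Nat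
  | 0 => 0
  | pos + 1 =>
      if (PySem.Str.strip (l.getD pos "")).isEmpty then pvCut l pos else pos + 1

theorem pvCut_le (l : List String) (pos : Nat) : pvCut l pos ≤ pos := by
  induction pos with
  | zero => simp [pvCut]
  | succ p ih =>
      unfold pvCut
      split
      · omega
      · omega

theorem pvCut_take (l : List String) (pos : Nat) (p : Nat) (h : p ≤ pos) :
    pvCut (l.take pos) p = pvCut l p := by
  induction p with
  | zero => simp [pvCut]
  | succ q ih =>
      unfold pvCut
      have hq : q < pos := by omega
      have hget : (l.take pos).getD q "" = l.getD q "" := by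
        simp [List.getD, hq]
      rw [hget, ih (by omega)]

theorem pvCut_append (l : List String) (a : String) (p : Nat) (h : p ≤ l.length) :
    pvCut (l ++ [a]) p = pvCut l p := by
  induction p with
  | zero => simp [pvCut]
  | succ q ih =>
      unfold pvCut
      have hq : q < l.length := by omega
      have hget : (l ++ [a]).getD q "" = l.getD q "" := by
        simp [List.getD, List.getElem?_append_left hq]
      rw [hget, ih (by omega)]

theorem pvLoopA_eq_take (pos : Nat) :
    ∀ l : List String, pos = l.length → pvLoopA l pos = l.take (pvCut l pos) := by
  induction pos with
  | zero =>
      intro l h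
      have : l = [] := by
        cases l with
        | nil => rfl
        | cons a t => simp at h
      subst this; simp [pvLoopA, pvCut]
  | succ p ih =>
      intro l h
      unfold pvLoopA pvCut
      split
      · have hlen : p = (l.take p).length := by
          simp [List.length_take]; omega
        rw [ih (l.take p) hlen, pvCut_take l p p (le_refl p), List.take_take]
        have := pvCut_le l p
        congr 1
        omega
      · rw [h, List.take_length]

-- B's forward fold from an arbitrary start index and accumulator
theorem foldKeep_append (l : List String) (a : String) (s acc : Int) :
    (PySem.List.enumerate (l ++ [a]) s).foldl
      (fun keep p => if ¬ (PySem.Str.strip p.2).isEmpty then p.1 + 1 else keep) acc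
    = (if ¬ (PySem.Str.strip a).isEmpty then (s + l.length : Int) + 1
       else (PySem.List.enumerate l s).foldl
         (fun keep p => if ¬ (PySem.Str.strip p.2).isEmpty then p.1 + 1 else keep) acc) := by
  rw [PySem.List.enumerate_append, List.foldl_append]
  simp [PySem.List.enumerate]

theorem foldKeep_eq_pvCut (l : List String) (acc : Int) :
    (PySem.List.enumerate l).foldl
      (fun keep p => if ¬ (PySem.Str.strip p.2).isEmpty then p.1 + 1 else keep) acc
    = if pvCut l l.length = 0 then acc else (pvCut l l.length : Int) := by
  induction l using List.reverseRecOn with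
  | nil => simp [PySem.List.enumerate, pvCut]
  | append_singleton l a ih =>
      rw [show PySem.List.enumerate (l ++ [a]) = PySem.List.enumerate (l ++ [a]) 0 from rfl,
          foldKeep_append]
      have hget : (l ++ [a]).getD l.length "" = a := by
        simp [List.getD]
      have hL : (l ++ [a]).length = l.length + 1 := by simp
      have hcut : pvCut (l ++ [a]) (l ++ [a]).length
          = if (PySem.Str.strip a).isEmpty then pvCut l l.length else l.length + 1 := by
        rw [hL,
            show pvCut (l ++ [a]) (l.length + 1)
              = if (PySem.Str.strip ((l ++ [a]).getD l.length "")).isEmpty then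
                  pvCut (l ++ [a]) l.length else l.length + 1 from rfl,
            hget, pvCut_append l a l.length (le_refl _)]
      rw [hcut]
      by_cases hA : (PySem.Str.strip a).isEmpty
      · rw [if_neg (by simp [hA]), if_pos hA]
        exact ih
      · rw [if_pos (by simp [hA]), if_neg hA]
        have : l.length + 1 ≠ 0 := by omega
        simp

-- ===== VERDICT =====
theorem removeTrailingEmptyElements_spec : Claim_equal_removeTrailingEmptyElements := by
  intro l _
  unfold Spec_removeTrailingEmptyElements removeTrailingEmptyElements removeTrailingEmptyElements_alt
  rw [foldKeep_eq_pvCut]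
  rw [pvLoopA_eq_take l.length l rfl]
  by_cases h : pvCut l l.length = 0
  · rw [if_pos h, h, show (0 : Int) = ((0 : Nat) : Int) from rfl, PySem.List.slice_to_natCast]
  · rw [if_neg h, PySem.List.slice_to_natCast]
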